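-- pv_equiv track=rewrite | github.com/Rohithyeravothula/leetcode | without_aaa.py | strWithout3a3b
-- ===== SOURCE A (Python) =====
-- def strWithout3a3b(a, b):
--     """
--     :type A: int
--     :type B: int
--     :rtype: str
--     """
--     c1, c2 = 'a', 'b'
--     if a<b:
--     	c1, c2 = 'b', 'a'
--     	a,b = b,a
--     ans = ""
--     d = a-b
--     for i in range(b):
--     	if d>0:
--     		ans += c1
--     		d-=1
--     	ans += (c1+c2)
--     if a > 2*b:
--     	ans += c1*(a-2*b)
--     return ans
-- ===== SOURCE B (Python) =====
-- def strWithout3a3b(a, b):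
--     # closed form: m full "xxy" chunks, then "xy" chunks, then the leftover run of x
--     if a >= b:
--         c1, c2, hi, lo = 'a', 'b', a, b
--     else:
--         c1, c2, hi, lo = 'b', 'a', b, a
--     m = min(hi - lo, lo)
--     return (c1 + c1 + c2) * m + (c1 + c2) * (lo - m) + c1 * (hi - 2 * lo)
-- ===== Notes on version B (the rewrite author's own statement) =====
-- stated objective: faster
-- what changed: Replaces A's per-chunk loop (range(b) iterations mutating a deficit counter and repeatedly concatenating) with a closed-form count m = min(hi-lo, lo) and a single concatenation of three repeated blocks 'xxy'*m + 'xy'*(lo-m) + 'x'*(hi-2*lo), exact for all ints including negatives via Python's empty negative repeats.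
import Mathlib
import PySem

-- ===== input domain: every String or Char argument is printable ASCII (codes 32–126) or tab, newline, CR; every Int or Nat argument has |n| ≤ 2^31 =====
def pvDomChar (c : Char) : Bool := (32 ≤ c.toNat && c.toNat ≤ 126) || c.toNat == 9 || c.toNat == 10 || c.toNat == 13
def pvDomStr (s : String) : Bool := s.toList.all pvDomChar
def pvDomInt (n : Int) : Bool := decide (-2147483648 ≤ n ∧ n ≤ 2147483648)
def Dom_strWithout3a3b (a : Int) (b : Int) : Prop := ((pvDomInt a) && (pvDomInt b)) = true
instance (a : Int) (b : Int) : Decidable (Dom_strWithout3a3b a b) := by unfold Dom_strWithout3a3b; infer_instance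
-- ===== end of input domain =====

-- B replaces A's per-chunk loop by a closed-form concatenation of three repeated blocks
-- ("xxy"*m + "xy"*(lo-m) + "x"*(hi-2*lo)); objective: faster (no Python-level loop).

-- ===== PORT A =====
-- strings are carried as List Char and packed with String.ofList at the end (exact; PySem's string
-- functions are themselves defined on List Char).
def strWithout3a3b (a : Int) (b : Int) : String :=
  -- c1, c2 = 'a','b'; if a < b: swap letters and counts
  match (if a < b then ((['b'] : List Char), (['a'] : List Char), b, a)
         else ((['a'] : List Char), (['b'] : List Char), a, b)) with
  | (c1, c2, a, b) =>
    -- ans = ""; d = a - b; for i in range(b): if d > 0: ans += c1; d -= 1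
    --                                        ans += (c1 + c2)
    let st := (PySem.List.pyRange 0 b 1).foldl
      (fun (st : List Char × Int) _ =>
        let st := if st.2 > 0 then (st.1 ++ c1, st.2 - 1) else st
        (st.1 ++ (c1 ++ c2), st.2)) ([], a - b)
    -- if a > 2*b: ans += c1*(a-2*b)
    let ans := if a > 2 * b then st.1 ++ PySem.List.pyRepeat c1 (a - 2 * b) else st.1
    String.ofList ans

-- ===== PORT B =====
def strWithout3a3b_alt (a : Int) (b : Int) : String :=
  match (if a ≥ b then (('a' : Char), ('b' : Char), a, b)
         else (('b' : Char), ('a' : Char), b, a)) with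
  | (c1, c2, hi, lo) =>
    let m := min (hi - lo) lo
    String.ofList (PySem.List.pyRepeat [c1, c1, c2] m ++
               PySem.List.pyRepeat [c1, c2] (lo - m) ++
               PySem.List.pyRepeat [c1] (hi - 2 * lo))

-- ===== PRECONDITION & SPEC =====
def Spec_strWithout3a3b (a : Int) (b : Int) (out : String) : Prop := out = strWithout3a3b_alt a b
instance (a : Int) (b : Int) (out : String) : Decidable (Spec_strWithout3a3b a b out) := by unfold Spec_strWithout3a3b; infer_instance

-- ===== CLAIM (what is proved, stated in full; the proofs are below) =====
def Claim_equal_strWithout3a3b : Prop := ∀ (a : Int) (b : Int), Dom_strWithout3a3b a b → Spec_strWithout3a3b a b (strWithout3a3b a b)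

-- ===== LEMMAS AND PROOFS =====

-- A's loop body, with the letters fixed
def pvStepA (c1 c2 : List Char) (st : List Char × Int) : List Char × Int :=
  let st := if st.2 > 0 then (st.1 ++ c1, st.2 - 1) else st
  (st.1 ++ (c1 ++ c2), st.2)

-- the loop ignores the range element, so the fold is an iterate of the body
lemma pvFoldl_const {α β : Type} (g : β → β) (l : List α) (init : β) :
    l.foldl (fun st _ => g st) init = g^[l.length] init := by
  induction l generalizing init with
  | nil => rfl
  | cons x t ih => simp [List.foldl_cons, ih, Function.iterate_succ_apply]

-- closed form of n iterations of A's body (d starts nonnegative):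
-- min d n enriched chunks first, then n - min d n plain chunks
lemma pvIterA (c1 c2 : List Char) (n : Nat) (acc : List Char) (d : Int) (hd0 : 0 ≤ d) :
    (pvStepA c1 c2)^[n] (acc, d) =
      (acc ++ PySem.List.pyRepeat (c1 ++ c1 ++ c2) (min d n) ++
        PySem.List.pyRepeat (c1 ++ c2) ((n : Int) - min d n),
       d - min d n) := by
  induction n generalizing acc d with
  | zero =>
    simp only [Function.iterate_zero, id_eq, Nat.cast_zero]
    have h0 : min d (0:Int) = 0 := by omega
    rw [h0]
    simp [PySem.List.pyRepeat]
  | succ n ih =>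
    rw [Function.iterate_succ_apply]
    by_cases hd : d > 0
    · have h1 : pvStepA c1 c2 (acc, d) = (acc ++ c1 ++ (c1 ++ c2), d - 1) := by
        simp [pvStepA, hd]
      rw [h1, ih _ _ (by omega)]
      have hmin : min d ((n:Int) + 1) = min (d - 1) (n : Int) + 1 := by omega
      simp only [Prod.mk.injEq]
      refine ⟨?_, by push_cast; omega⟩
      push_cast
      rw [hmin]
      have hnn : 0 ≤ min (d - 1) (n : Int) := by omega
      have hrep : PySem.List.pyRepeat (c1 ++ c1 ++ c2) (min (d - 1) (n:Int) + 1)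
          = (c1 ++ c1 ++ c2) ++ PySem.List.pyRepeat (c1 ++ c1 ++ c2) (min (d - 1) (n:Int)) := by
        have ht : (min (d - 1) (n:Int) + 1).toNat = (min (d - 1) (n:Int)).toNat + 1 := by omega
        simp [PySem.List.pyRepeat, ht, List.replicate_succ]
      rw [hrep]
      have harg : (n:Int) + 1 - (min (d - 1) (n:Int) + 1) = (n:Int) - min (d - 1) (n:Int) := by ring
      rw [harg]
      simp [List.append_assoc]
    · have hd' : d = 0 := by omega
      have h1 : pvStepA c1 c2 (acc, d) = (acc ++ (c1 ++ c2), d) := by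
        simp [pvStepA, hd]
      rw [h1, ih _ _ hd0]
      subst hd'
      have h2 : min (0:Int) (n:Int) = 0 := by omega
      have h3 : min (0:Int) ((n:Int)+1) = 0 := by omega
      simp only [Prod.mk.injEq]
      push_cast
      rw [h2, h3]
      refine ⟨?_, rfl⟩
      have hrep : PySem.List.pyRepeat (c1 ++ c2) ((n:Int) + 1 - 0)
          = (c1 ++ c2) ++ PySem.List.pyRepeat (c1 ++ c2) ((n:Int) - 0) := by
        have ht : ((n:Int) + 1 - 0).toNat = ((n:Int) - 0).toNat + 1 := by omega
        rw [PySem.List.pyRepeat, PySem.List.pyRepeat, ht]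
        simp [List.replicate_succ]
      rw [hrep]
      simp [PySem.List.pyRepeat]

-- one branch of the programs, letters fixed: A's loop+tail equals B's three blocks
lemma pvMain (c1 c2 : Char) (hi lo : Int) (h : lo ≤ hi) :
    (let st := (PySem.List.pyRange 0 lo 1).foldl
        (fun (st : List Char × Int) _ =>
          let st := if st.2 > 0 then (st.1 ++ [c1], st.2 - 1) else st
          (st.1 ++ ([c1] ++ [c2]), st.2)) ([], hi - lo)
     if hi > 2 * lo then st.1 ++ PySem.List.pyRepeat [c1] (hi - 2 * lo) else st.1)
    = PySem.List.pyRepeat [c1, c1, c2] (min (hi - lo) lo) ++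
        PySem.List.pyRepeat [c1, c2] (lo - min (hi - lo) lo) ++
        PySem.List.pyRepeat [c1] (hi - 2 * lo) := by
  show (let st := (PySem.List.pyRange 0 lo 1).foldl
          (fun st _ => pvStepA [c1] [c2] st) ([], hi - lo)
        if hi > 2 * lo then st.1 ++ PySem.List.pyRepeat [c1] (hi - 2 * lo) else st.1) = _
  rw [pvFoldl_const]
  have hlen : (PySem.List.pyRange 0 lo 1).length = lo.toNat := by
    simp [PySem.List.pyRange_one]
  rw [hlen, pvIterA _ _ _ _ _ (by omega)]
  rcases lt_or_ge lo 0 with hlo | hlo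
  · -- lo < 0: the loop is empty, min (hi-lo) lo = lo, all block repeats are empty
    have h0 : lo.toNat = 0 := by omega
    have hm : min (hi - lo) lo = lo := by omega
    have hgt : hi > 2 * lo := by omega
    rw [h0, hm]
    simp only [Nat.cast_zero]
    have hz : min (hi - lo) (0:Int) = 0 := by omega
    rw [hz]
    simp [PySem.List.pyRepeat, h0, hgt]
  · -- lo ≥ 0
    have hn : ((lo.toNat : Nat) : Int) = lo := Int.toNat_of_nonneg hlo
    rw [hn]
    have hchunk : ([c1] ++ [c1] ++ [c2] : List Char) = [c1, c1, c2] := rfl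
    have hchunk2 : ([c1] ++ [c2] : List Char) = [c1, c2] := rfl
    rw [hchunk, hchunk2]
    by_cases hgt : hi > 2 * lo
    · simp [hgt, List.append_assoc]
    · have e5 : PySem.List.pyRepeat [c1] (hi - 2 * lo) = ([] : List Char) := by
        simp [PySem.List.pyRepeat, Int.toNat_of_nonpos (by omega : hi - 2 * lo ≤ 0)]
      simp [hgt, e5]

-- ===== VERDICT (by name: the statement is the Claim_ definition above) =====
theorem strWithout3a3b_spec : Claim_equal_strWithout3a3b := by
  intro a b _
  unfold Spec_strWithout3a3b strWithout3a3b strWithout3a3b_alt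
  by_cases hab : a < b
  · rw [if_pos hab, if_neg (by omega : ¬ a ≥ b)]
    exact congrArg String.ofList (pvMain 'b' 'a' b a (by omega))
  · rw [if_neg hab, if_pos (by omega : a ≥ b)]
    exact congrArg String.ofList (pvMain 'a' 'b' a b (by omega))
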